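-- pv_equiv track=rewrite | github.com/CalvinSalsali04/SecurePHI | backend/gpt_model/model.py | redact_sections
-- ===== SOURCE A (Python) =====
-- def redact_sections(cleaned_note, sections, list_of_access):
--     # Split the cleaned note into lines for easier manipulation
--     lines = cleaned_note.strip().split('\n')
--
--     # Create a set for quick lookup
--     accessible_sections = set(list_of_access)
--
--     # Iterate over the sections to determine which ones to redact
--     redacted_lines = []
--     current_section_header = None
--
--     for line in lines:
--         # Check if the line is a section header
--         if line.startswith("###"):
--             current_section_header = line.replace("###", "").strip()
--             redacted_lines.append(line)  # Add header to redacted lines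
--         else:
--             # Redact content if it's not in an accessible section
--             if current_section_header and current_section_header not in accessible_sections:
--                 redacted_lines.append("[REDACTED]")
--             else:
--                 redacted_lines.append(line)
--
--     # Join the lines back into a single string
--     redacted_note = "\n".join(redacted_lines)
--     return redacted_note
-- ===== SOURCE B (Python) =====
-- def redact_sections(cleaned_note, sections, list_of_access):
--     # Pass 1: group lines into a leading headerless block and (header, text, content) sections.
--     lines = cleaned_note.strip().split('\n')
--     lead, done, cur = [], [], None
--     for line in lines:
--         if line.startswith("###"):
--             if cur is not None:
--                 done.append(cur)
--             cur = (line, line.replace("###", "").strip(), [])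
--         elif cur is not None:
--             cur[2].append(line)
--         else:
--             lead.append(line)
--     if cur is not None:
--         done.append(cur)
--     # Pass 2: emit each group, redacting content of inaccessible sections.
--     allowed = set(list_of_access)
--     out = list(lead)
--     for header_line, text, content in done:
--         out.append(header_line)
--         if text and text not in allowed:
--             out.extend("[REDACTED]" for _ in content)
--         else:
--             out.extend(content)
--     return "\n".join(out)
-- ===== Notes on version B (the rewrite author's own statement) =====
-- stated objective: alternative
-- what changed: B replaces A's single stateful line-by-line stream (carrying the current header and deciding redaction per line) with a two-pass group-then-map pipeline: pass 1 groups lines into a leading block plus (header, text, content) sections, pass 2 emits each group, redacting whole content blocks of inaccessible sections.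
import Mathlib
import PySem

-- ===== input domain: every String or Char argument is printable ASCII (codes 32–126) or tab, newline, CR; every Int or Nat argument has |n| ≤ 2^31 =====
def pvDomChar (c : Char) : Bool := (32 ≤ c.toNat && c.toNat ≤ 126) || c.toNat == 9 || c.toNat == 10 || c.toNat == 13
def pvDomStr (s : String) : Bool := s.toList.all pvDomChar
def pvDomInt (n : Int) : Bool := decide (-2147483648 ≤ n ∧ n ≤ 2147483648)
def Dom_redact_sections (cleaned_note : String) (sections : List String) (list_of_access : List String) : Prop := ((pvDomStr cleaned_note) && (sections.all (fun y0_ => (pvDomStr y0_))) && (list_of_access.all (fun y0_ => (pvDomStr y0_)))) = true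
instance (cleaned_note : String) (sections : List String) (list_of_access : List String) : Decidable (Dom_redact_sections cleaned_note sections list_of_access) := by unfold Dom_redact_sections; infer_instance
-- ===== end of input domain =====

-- B re-groups the note into (header, content) sections first and then redacts per group
-- (two-pass group-then-map decomposition instead of A's single stateful stream); objective: alternative.

-- ===== PORT A =====
-- one step of A's loop: state = (redacted_lines, current_section_header)
def pvStepA (allowed : PySem.Set String) (st : List String × Option String) (line : String) :
    List String × Option String :=
  if PySem.Str.startswith line "###" then
    (st.1 ++ [line], some (PySem.Str.strip (PySem.Str.replace line "###" "")))
  else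
    match st.2 with
    | some h =>
        if h ≠ "" ∧ ¬ (PySem.Set.contains allowed h = true) then (st.1 ++ ["[REDACTED]"], st.2)
        else (st.1 ++ [line], st.2)
    | none => (st.1 ++ [line], st.2)

def redact_sections (cleaned_note : String) (sections : List String) (list_of_access : List String) : String :=
  let lines := (PySem.Str.split? (PySem.Str.strip cleaned_note) "\n").getD []
  let accessible_sections := PySem.Set.ofList list_of_access
  let st := lines.foldl (pvStepA accessible_sections) ([], none)
  PySem.Str.join "\n" st.1

-- ===== PORT B =====
-- a group: (raw header line, normalized header text, content lines)
-- one step of B's pass 1: state = (lead, done, cur)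
def pvStepB (st : List String × List (String × String × List String) × Option (String × String × List String))
    (line : String) :
    List String × List (String × String × List String) × Option (String × String × List String) :=
  if PySem.Str.startswith line "###" then
    (st.1, st.2.1 ++ st.2.2.toList, some (line, PySem.Str.strip (PySem.Str.replace line "###" ""), []))
  else
    match st.2.2 with
    | some g => (st.1, st.2.1, some (g.1, g.2.1, g.2.2 ++ [line]))
    | none => (st.1 ++ [line], st.2.1, none)

-- B's pass 2 for one group
def pvEmit (allowed : PySem.Set String) (g : String × String × List String) : List String :=
  g.1 :: (if g.2.1 ≠ "" ∧ ¬ (PySem.Set.contains allowed g.2.1 = true)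
          then g.2.2.map (fun _ => "[REDACTED]") else g.2.2)

def redact_sections_alt (cleaned_note : String) (sections : List String) (list_of_access : List String) : String :=
  let lines := (PySem.Str.split? (PySem.Str.strip cleaned_note) "\n").getD []
  let st := lines.foldl pvStepB ([], [], none)
  let groups := st.2.1 ++ st.2.2.toList
  let allowed := PySem.Set.ofList list_of_access
  let out := groups.foldl (fun acc g => acc ++ pvEmit allowed g) st.1
  PySem.Str.join "\n" out

-- ===== PRECONDITION & SPEC =====
def Spec_redact_sections (cleaned_note : String) (sections : List String) (list_of_access : List String) (out : String) : Prop := out = redact_sections_alt cleaned_note sections list_of_access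
instance (cleaned_note : String) (sections : List String) (list_of_access : List String) (out : String) : Decidable (Spec_redact_sections cleaned_note sections list_of_access out) := by unfold Spec_redact_sections; infer_instance

-- ===== CLAIM (what is proved, stated in full; the proofs are below) =====
def Claim_equal_redact_sections : Prop := ∀ (cleaned_note : String) (sections : List String) (list_of_access : List String), Dom_redact_sections cleaned_note sections list_of_access → Spec_redact_sections cleaned_note sections list_of_access (redact_sections cleaned_note sections list_of_access)

-- ===== LEMMAS AND PROOFS =====

-- loop invariant: A's accumulated output is B's state rendered (lead, then each
-- finished/open group emitted), and A's current header is the text of B's open group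
theorem pv_loop (allowed : PySem.Set String) (lines : List String) :
    ∀ (lead : List String) (done : List (String × String × List String))
      (cur : Option (String × String × List String)),
      (cur = none → done = []) →
      (lines.foldl (pvStepA allowed)
        (lead ++ (done ++ cur.toList).flatMap (pvEmit allowed),
         cur.map (fun g => g.2.1))).1
      = (let st := lines.foldl pvStepB (lead, done, cur)
         st.1 ++ (st.2.1 ++ st.2.2.toList).flatMap (pvEmit allowed)) := by
  induction lines with
  | nil => intro lead done cur hnd; rfl
  | cons line rest ih =>
      intro lead done cur hnd
      simp only [List.foldl_cons]
      by_cases hs : PySem.Chars.startswith line.toList ['#', '#', '#'] = true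
      · -- header line
        have hA : pvStepA allowed
            (lead ++ (done ++ cur.toList).flatMap (pvEmit allowed), cur.map (fun g => g.2.1)) line
            = (lead ++ ((done ++ cur.toList) ++
                [(line, PySem.Str.strip (PySem.Str.replace line "###" ""), [])]).flatMap (pvEmit allowed),
               (some (line, PySem.Str.strip (PySem.Str.replace line "###" ""),
                  ([] : List String))).map (fun g => g.2.1)) := by
          simp [pvStepA, PySem.Str.startswith_eq, hs, pvEmit]
        have hB : pvStepB (lead, done, cur) line
            = (lead, done ++ cur.toList,
               some (line, PySem.Str.strip (PySem.Str.replace line "###" ""), [])) := by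
          simp [pvStepB, PySem.Str.startswith_eq, hs]
        rw [hA, hB]
        have := ih lead (done ++ cur.toList)
          (some (line, PySem.Str.strip (PySem.Str.replace line "###" ""), [])) (by simp)
        simpa using this
      · cases cur with
        | none =>
            have hd := hnd rfl; subst hd
            have hA : pvStepA allowed
                (lead ++ (([] : List (String × String × List String)) ++
                  (none : Option (String × String × List String)).toList).flatMap (pvEmit allowed),
                 (none : Option (String × String × List String)).map (fun g => g.2.1))
                 line
                = ((lead ++ [line]) ++ (([] : List (String × String × List String)) ++
                    (none : Option (String × String × List String)).toList).flatMap (pvEmit allowed),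
                   (none : Option (String × String × List String)).map (fun g => g.2.1)) := by
              simp [pvStepA, PySem.Str.startswith_eq, hs]
            have hB : pvStepB (lead, [], none) line = (lead ++ [line], [], none) := by
              simp [pvStepB, PySem.Str.startswith_eq, hs]
            rw [hA, hB]
            exact ih (lead ++ [line]) [] none (fun _ => rfl)
        | some g =>
            obtain ⟨hl, t, c⟩ := g
            have hA : pvStepA allowed
                ((lead ++ (done ++ [(hl, t, c)]).flatMap (pvEmit allowed) : List String), some t) line
                = (lead ++ (done ++ [(hl, t, c ++ [line])]).flatMap (pvEmit allowed), some t) := by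
              by_cases hr : ¬t = "" ∧ t ∉ allowed
              · simp [pvStepA, PySem.Str.startswith_eq, hs, pvEmit, hr]
              · simp [pvStepA, PySem.Str.startswith_eq, hs, pvEmit, hr]
            have hB : pvStepB (lead, done, some (hl, t, c)) line
                = (lead, done, some (hl, t, c ++ [line])) := by
              simp [pvStepB, PySem.Str.startswith_eq, hs]
            simp only [Option.toList_some, Option.map_some]
            rw [hA, hB]
            have := ih lead done (some (hl, t, c ++ [line])) (by simp)
            simpa using this

-- ===== VERDICT (by name: the statement is the Claim_ definition above) =====
theorem redact_sections_spec : Claim_equal_redact_sections := by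
  intro cleaned_note sections list_of_access _
  unfold Spec_redact_sections redact_sections redact_sections_alt
  have h := pv_loop (PySem.Set.ofList list_of_access)
    ((PySem.Str.split? (PySem.Str.strip cleaned_note) "\n").getD []) [] [] none (fun _ => rfl)
  simp only [Option.toList_none, List.append_nil, List.flatMap_nil, Option.map_none] at h
  simp only [PySem.List.foldl_append_eq_flatMap]
  rw [h]
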